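-- pv_equiv track=rewrite | github.com/emanuxd11/FP-feup | Q5/3.py | mask_data
-- ===== SOURCE A (Python) =====
-- def mask_data(data, n_characters, position):
--     if n_characters == 0:
--         return data
--
--     result = ""
--     if position == "end":
--         data = data[::-1]
--     for i in range(len(data)):
--         if i < n_characters:
--             result += '*'
--         else:
--             result += data[i]
--     if position == "end":
--         result = result[::-1]
--
--     return result
-- ===== SOURCE B (Python) =====
-- def mask_data(data, n_characters, position):
--     if n_characters == 0:
--         return data
--     m = max(0, min(n_characters, len(data)))
--     if position == "end":
--         return data[:len(data) - m] + '*' * m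
--     return '*' * m + data[m:]
-- ===== Notes on version B (the rewrite author's own statement) =====
-- stated objective: simpler
-- what changed: Replaces A's reverse / character-by-character index loop / reverse-again construction with a closed-form two-segment slice: clamp n to [0,len] and concatenate the asterisk block with the kept slice.
import Mathlib
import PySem

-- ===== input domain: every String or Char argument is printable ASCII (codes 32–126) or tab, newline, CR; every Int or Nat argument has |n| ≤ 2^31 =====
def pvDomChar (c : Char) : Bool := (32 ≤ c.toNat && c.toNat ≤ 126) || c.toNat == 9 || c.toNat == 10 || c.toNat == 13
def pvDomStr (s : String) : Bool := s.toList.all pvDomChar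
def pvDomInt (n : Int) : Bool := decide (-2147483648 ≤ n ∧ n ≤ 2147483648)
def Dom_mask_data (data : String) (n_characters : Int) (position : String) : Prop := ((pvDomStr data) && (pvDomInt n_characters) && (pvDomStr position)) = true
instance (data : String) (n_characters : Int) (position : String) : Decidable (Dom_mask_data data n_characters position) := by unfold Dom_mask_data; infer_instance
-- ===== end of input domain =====

-- B replaces A's reverse / per-character index loop / reverse-again construction by a
-- closed-form two-segment slice (clamped asterisk block + kept slice); objective: simpler.

-- ===== PORT A =====
-- result is accumulated as a List Char ('result += ch') and turned into a String at the
-- end; data[::-1] and result[::-1] are the PySem slice? primitive.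
def mask_data (data : String) (n_characters : Int) (position : String) : String :=
  if n_characters == 0 then data
  else
    let data := if position == "end" then ((PySem.Str.slice? data none none (-1)).getD "") else data
    let result : List Char :=
      (PySem.List.pyRange 0 (PySem.Str.len data)).foldl
        (fun res i => if i < n_characters then res ++ ['*'] else res ++ [PySem.List.pyGetD data.toList i ' ']) []
    let result := if position == "end" then ((PySem.List.slice? result none none (-1)).getD []) else result
    String.ofList result

-- ===== PORT B =====
def mask_data_alt (data : String) (n_characters : Int) (position : String) : String :=
  if n_characters == 0 then data
  else
    let m : Int := max 0 (min n_characters (PySem.Str.len data))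
    if position == "end" then
      String.ofList (PySem.List.slice data.toList none (some (PySem.Str.len data - m)) ++ PySem.List.pyRepeat ['*'] m)
    else
      String.ofList (PySem.List.pyRepeat ['*'] m ++ PySem.List.slice data.toList (some m) none)

-- ===== PRECONDITION & SPEC =====
def Spec_mask_data (data : String) (n_characters : Int) (position : String) (out : String) : Prop := out = mask_data_alt data n_characters position
instance (data : String) (n_characters : Int) (position : String) (out : String) : Decidable (Spec_mask_data data n_characters position out) := by unfold Spec_mask_data; infer_instance

-- ===== CLAIM (what is proved, stated in full; the proofs are below) =====
def Claim_equal_mask_data : Prop := ∀ (data : String) (n_characters : Int) (position : String), Dom_mask_data data n_characters position → Spec_mask_data data n_characters position (mask_data data n_characters position)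

-- ===== LEMMAS AND PROOFS =====

-- A's masking loop over indices 0..len-1 produces the clamped asterisk block followed by the tail.
theorem pvLoopA_eq (n : Int) (l : List Char) :
    (PySem.List.pyRange 0 (l.length : Int)).foldl
      (fun res i => if i < n then res ++ ['*'] else res ++ [PySem.List.pyGetD l i ' ']) []
    = List.replicate (max 0 (min n (l.length : Int))).toNat '*'
        ++ l.drop (max 0 (min n (l.length : Int))).toNat := by
  induction l using List.reverseRecOn with
  | nil =>
      simp [PySem.List.pyRange_one_eq_nil]
  | append_singleton l c ih =>
      have hL : ((l ++ [c]).length : Int) = (l.length : Int) + 1 := by simp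
      rw [hL, PySem.List.pyRange_one_succ_right (by positivity), List.foldl_append]
      have hcongr :
          (PySem.List.pyRange 0 (l.length : Int)).foldl
            (fun res i => if i < n then res ++ ['*'] else res ++ [PySem.List.pyGetD (l ++ [c]) i ' ']) []
          = (PySem.List.pyRange 0 (l.length : Int)).foldl
            (fun res i => if i < n then res ++ ['*'] else res ++ [PySem.List.pyGetD l i ' ']) [] := by
        apply PySem.List.foldl_congr_mem
        intro acc x hx
        rw [PySem.List.mem_pyRange_one] at hx
        have h0 : (0:Int) ≤ x := hx.1
        have hlt : x.toNat < l.length := by omega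
        rw [PySem.List.pyGetD_of_nonneg _ _ h0, PySem.List.pyGetD_of_nonneg _ _ h0]
        simp [List.getD, List.getElem?_append_left hlt]
      rw [hcongr, ih]
      have hlast : PySem.List.pyGetD (l ++ [c]) (l.length : Int) ' ' = c := by
        rw [PySem.List.pyGetD_of_nonneg _ _ (by positivity)]
        simp [List.getD]
      simp only [List.foldl_cons, List.foldl_nil]
      by_cases hn : (l.length : Int) < n
      · simp only [if_pos hn]
        have hm : (max 0 (min n (l.length : Int))).toNat = l.length := by omega
        have hm' : (max 0 (min n ((l.length : Int) + 1))).toNat = l.length + 1 := by omega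
        rw [hm, hm']
        simp [List.replicate_succ']
      · simp only [if_neg hn, hlast]
        have hm : (max 0 (min n ((l.length : Int) + 1))).toNat = (max 0 (min n (l.length : Int))).toNat := by omega
        have hle : (max 0 (min n (l.length : Int))).toNat ≤ l.length := by omega
        rw [hm, List.drop_append_of_le_length hle]
        simp

theorem mask_data_eq (data : String) (n_characters : Int) (position : String) :
    mask_data data n_characters position = mask_data_alt data n_characters position := by
  unfold mask_data mask_data_alt
  by_cases hn : n_characters == 0
  · simp [hn]
  · simp only [hn, Bool.false_eq_true, if_false]
    set l := data.toList with hl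
    have hlen : PySem.Str.len data = (l.length : Int) := by simp [PySem.Str.len_eq, hl]
    set m : Int := max 0 (min n_characters (PySem.Str.len data)) with hm
    have hm0 : 0 ≤ m := le_max_left _ _
    have hmle : m ≤ (l.length : Int) := by rw [hm, hlen]; omega
    by_cases hp : position == "end"
    · simp only [hp, if_pos, PySem.Str.slice?_none_none_neg_one, Option.getD_some]
      have hrl : (String.ofList l.reverse).toList = l.reverse := by simp
      rw [PySem.Str.len_eq, hrl, PySem.List.slice?_none_none_neg_one, Option.getD_some,
        pvLoopA_eq]
      have hmrev : (max 0 (min n_characters ((l.reverse.length : Int)))).toNat = m.toNat := by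
        simp only [List.length_reverse]; rw [hm, hlen]
      rw [hmrev]
      rw [PySem.List.slice_to _ (by omega), PySem.List.pyRepeat_singleton]
      have htn : (PySem.Str.len data - m).toNat = l.length - m.toNat := by
        rw [hlen]; omega
      have hrev : (l.reverse.drop m.toNat).reverse = l.take (l.length - m.toNat) := by
        have h := List.reverse_take (l := l) (i := l.length - m.toNat)
        rw [show l.length - (l.length - m.toNat) = m.toNat from by omega] at h
        rw [← h, List.reverse_reverse]
      rw [htn, List.reverse_append, List.reverse_replicate, hrev]
    · simp only [hp, Bool.false_eq_true, if_false]
      rw [PySem.Str.len_eq, ← hl, pvLoopA_eq]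
      rw [PySem.List.slice_from _ hm0, PySem.List.pyRepeat_singleton]
      have htn : (max 0 (min n_characters (l.length : Int))).toNat = m.toNat := by
        rw [hm, hlen]
      rw [htn]

-- ===== VERDICT (by name: the statement is the Claim_ definition above) =====
theorem mask_data_spec : Claim_equal_mask_data := by
  intro data n pos _
  exact mask_data_eq data n pos
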